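-- pv_equiv track=rewrite | github.com/K-Y-k/Coding_Test_Python_SQL | 프로그래머스/Lv0/문자열 정렬하기(2).py | solution
-- ===== SOURCE A (Python) =====
-- def solution(my_string):
--     answer = []
--
--     for i in my_string:
--         if i == i.upper():
--             answer.append(i.lower())
--         else:
--             answer.append(i)
--
--     answer.sort()
--
--     answer = ''.join(answer)
--
--
--     return answer
-- ===== SOURCE B (Python) =====
-- def solution(my_string):
--     # Counting sort over ASCII codes after lowercasing: O(n + 128) instead of O(n log n).
--     counts = [0] * 128
--     for ch in my_string:
--         o = ord(ch)
--         if 65 <= o <= 90: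
--             o += 32
--         counts[o] += 1
--     out = []
--     for o in range(128):
--         out.append(chr(o) * counts[o])
--     return ''.join(out)
-- ===== Notes on version B (the rewrite author's own statement) =====
-- stated objective: faster
-- what changed: Replaces A's per-character append loop followed by a comparison sort (list.sort) with a single counting pass over a 128-entry ASCII frequency table and a direct rebuild in code order (counting sort).
import Mathlib
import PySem

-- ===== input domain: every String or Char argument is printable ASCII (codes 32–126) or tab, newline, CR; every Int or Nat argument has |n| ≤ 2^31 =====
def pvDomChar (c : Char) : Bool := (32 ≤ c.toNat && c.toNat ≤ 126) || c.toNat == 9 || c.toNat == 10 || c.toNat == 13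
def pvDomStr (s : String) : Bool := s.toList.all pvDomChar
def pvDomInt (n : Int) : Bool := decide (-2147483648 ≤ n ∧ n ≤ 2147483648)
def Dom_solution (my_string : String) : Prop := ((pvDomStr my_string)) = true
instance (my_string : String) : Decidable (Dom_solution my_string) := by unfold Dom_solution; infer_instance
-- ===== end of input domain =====

-- B replaces A's comparison sort of the lowercased characters by a counting sort
-- over the 128 ASCII codes (objective: faster, asymptotic O(n) vs O(n log n)).

-- ===== PORT A =====
def solution (my_string : String) : String :=
  let answer := my_string.toList.foldl
    (fun acc i => if i == PySem.Chars.upperChar i then acc ++ [PySem.Chars.lowerChar i] else acc ++ [i]) []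
  let answer := PySem.List.sorted answer (fun x => x) false
  String.ofList answer

-- ===== PORT B =====
-- ord(ch), lowered: +32 when ch is an uppercase ASCII letter
def lowOrd (c : Char) : Nat := if 65 ≤ c.toNat ∧ c.toNat ≤ 90 then c.toNat + 32 else c.toNat

def solution_alt (my_string : String) : String :=
  let counts := my_string.toList.foldl
    (fun cnts ch => cnts.set (lowOrd ch) (cnts.getD (lowOrd ch) 0 + 1)) (List.replicate 128 0)
  let out := (List.range 128).map (fun o => List.replicate (counts.getD o 0) (Char.ofNat o))
  String.ofList out.flatten

-- ===== PRECONDITION & SPEC =====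
def Spec_solution (my_string : String) (out : String) : Prop := out = solution_alt my_string
instance (my_string : String) (out : String) : Decidable (Spec_solution my_string out) := by unfold Spec_solution; infer_instance

-- ===== CLAIM (what is proved, stated in full; the proofs are below) =====
def Claim_equal_solution : Prop := ∀ (my_string : String), Dom_solution my_string → Spec_solution my_string (solution my_string)

-- ===== LEMMAS AND PROOFS =====

-- A's per-character transformation
def lowA (c : Char) : Char := if c == PySem.Chars.upperChar c then PySem.Chars.lowerChar c else c

theorem dom_lt128 {c : Char} (h : pvDomChar c = true) : c.toNat < 128 := by
  simp [pvDomChar] at h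
  omega

theorem lowOrd_lt {c : Char} (h : c.toNat < 128) : lowOrd c < 128 := by
  unfold lowOrd; split_ifs <;> omega

theorem lowA_eq_fin : ∀ n : Fin 128, lowA (Char.ofNat n.val) = Char.ofNat (lowOrd (Char.ofNat n.val)) := by
  decide

theorem lowA_eq {c : Char} (h : c.toNat < 128) : lowA c = Char.ofNat (lowOrd c) := by
  have := lowA_eq_fin ⟨c.toNat, h⟩
  simpa [Char.ofNat_toNat] using this

theorem counts_getD (cs : List Char) (init : List ℕ) (hlen : init.length = 128)
    (hcs : ∀ c ∈ cs, lowOrd c < 128) (o : ℕ) :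
    (cs.foldl (fun cnts ch => cnts.set (lowOrd ch) (cnts.getD (lowOrd ch) 0 + 1)) init).getD o 0
      = init.getD o 0 + List.count o (cs.map lowOrd) := by
  induction cs generalizing init with
  | nil => simp
  | cons c cs ih =>
    have hc : lowOrd c < 128 := hcs c (by simp)
    have hlt : lowOrd c < init.length := by omega
    rw [List.foldl_cons, ih _ (by simp [hlen]) (fun d hd => hcs d (by simp [hd]))]
    simp only [List.map_cons, List.count_cons]
    have hset : (init.set (lowOrd c) (init.getD (lowOrd c) 0 + 1)).getD o 0
        = if lowOrd c = o then init.getD o 0 + 1 else init.getD o 0 := by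
      simp only [List.getD_eq_getElem?_getD, List.getElem?_set]
      split_ifs with h1
      · subst h1; simp [hlt]
      · rfl
    rw [hset]
    by_cases h1 : lowOrd c = o
    · subst h1
      simp
      omega
    · simp [h1]

theorem sum_ite_range (n j : ℕ) (g : ℕ → ℕ) :
    ((List.range n).map (fun o => if o = j then g o else 0)).sum = if j < n then g j else 0 := by
  induction n with
  | zero => simp
  | succ n ih =>
    rw [List.range_succ]
    simp only [List.map_append, List.sum_append, ih, List.map_cons, List.map_nil]
    by_cases h : j < n
    · have : n ≠ j := by omega
      simp [h, this, Nat.lt_succ_of_lt h]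
    · by_cases h2 : n = j
      · subst h2; simp
      · have : ¬ j < n + 1 := by omega
        simp [h, h2, this]

theorem toNat_ofNat {o : ℕ} (h : o < 128) : (Char.ofNat o).toNat = o := by
  have hv : o.isValidChar := Or.inl (by omega)
  simp [Char.ofNat, hv, Char.toNat, Char.ofNatAux]

theorem ofNat_eq_iff {o : ℕ} (ho : o < 128) (x : Char) : Char.ofNat o = x ↔ o = x.toNat := by
  constructor
  · intro h; rw [← h]; exact (toNat_ofNat ho).symm
  · intro h; subst h; exact Char.ofNat_toNat x

theorem perm_flatten (ords : List ℕ) (h : ∀ o ∈ ords, o < 128) :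
    ((List.range 128).map (fun o => List.replicate (List.count o ords) (Char.ofNat o))).flatten.Perm
      (ords.map Char.ofNat) := by
  rw [List.perm_iff_count]
  intro x
  rw [← List.flatMap_def, List.count_flatMap]
  simp only [Function.comp_def, List.count_replicate]
  have hL : ((List.range 128).map fun o => if (Char.ofNat o == x) = true then List.count o ords else 0)
      = (List.range 128).map (fun o => if o = x.toNat then List.count o ords else 0) := by
    apply List.map_congr_left
    intro o ho
    have ho' : o < 128 := by simpa using ho
    simp [beq_iff_eq, ofNat_eq_iff ho']
  rw [hL, sum_ite_range]
  rw [show List.count x (ords.map Char.ofNat) = ords.countP (fun a => Char.ofNat a == x) by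
    simp [List.count, List.countP_map, Function.comp_def]]
  by_cases hx : x.toNat < 128
  · simp only [hx, if_true]
    rw [List.count_eq_countP]
    apply List.countP_congr
    intro o ho
    have hiff := ofNat_eq_iff (h o ho) x
    by_cases he : Char.ofNat o = x
    · have h1 : o = x.toNat := hiff.mp he
      simp [h1]
    · have h1 : ¬ o = x.toNat := fun hh => he (hiff.mpr hh)
      simp [he, h1]
  · simp only [hx, if_false]
    symm
    rw [List.countP_eq_zero]
    intro o ho
    have ho' : o < 128 := h o ho
    simp only [beq_iff_eq]
    intro hh
    have := (ofNat_eq_iff ho' x).mp hh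
    omega

theorem ofNat_le_ofNat {o1 o2 : ℕ} (h1 : o1 < 128) (h2 : o2 < 128) (h : o1 ≤ o2) :
    Char.ofNat o1 ≤ Char.ofNat o2 := by
  have hh : (Char.ofNat o1).toNat ≤ (Char.ofNat o2).toNat := by
    rw [toNat_ofNat h1, toNat_ofNat h2]; exact h
  exact Char.le_def.mp hh

theorem pairwise_flatten_out (cnt : ℕ → ℕ) :
    ((List.range 128).map (fun o => List.replicate (cnt o) (Char.ofNat o))).flatten.Pairwise (· ≤ ·) := by
  rw [List.pairwise_flatten]
  constructor
  · intro l hl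
    simp only [List.mem_map] at hl
    obtain ⟨o, _, rfl⟩ := hl
    exact List.pairwise_replicate.mpr (Or.inr le_rfl)
  · rw [List.pairwise_map]
    refine List.Pairwise.imp_of_mem ?_ List.pairwise_lt_range
    intro o1 o2 h1 h2 hlt x hx y hy
    rw [List.eq_of_mem_replicate hx, List.eq_of_mem_replicate hy]
    exact ofNat_le_ofNat (by simpa using h1) (by simpa using h2) (le_of_lt hlt)

-- ===== VERDICT (by name: the statement is the Claim_ definition above) =====
theorem solution_spec : Claim_equal_solution := by
  intro s hdom
  unfold Spec_solution solution solution_alt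
  simp only
  have hall : ∀ c ∈ s.toList, pvDomChar c = true := by
    simpa [Dom_solution, pvDomStr, List.all_eq_true] using hdom
  have hdom' : ∀ c ∈ s.toList, c.toNat < 128 := fun c hc => dom_lt128 (hall c hc)
  -- A's loop builds the lowercased list
  have hfold : s.toList.foldl
      (fun acc i => if i == PySem.Chars.upperChar i then acc ++ [PySem.Chars.lowerChar i] else acc ++ [i]) []
      = s.toList.map lowA := by
    have : (fun (acc : List Char) i => if i == PySem.Chars.upperChar i then acc ++ [PySem.Chars.lowerChar i] else acc ++ [i])
        = fun acc i => acc ++ [lowA i] := by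
      funext acc i; unfold lowA; split_ifs <;> rfl
    rw [this, PySem.List.foldl_append_singleton_eq_map]
    simp
  rw [hfold]
  congr 1
  -- B's counts are the multiplicities of the lowered codes
  have hcnt : ∀ o : ℕ, (s.toList.foldl
      (fun cnts ch => cnts.set (lowOrd ch) (cnts.getD (lowOrd ch) 0 + 1)) (List.replicate 128 0)).getD o 0
      = List.count o (s.toList.map lowOrd) := by
    intro o
    rw [counts_getD _ _ (by simp) (fun c hc => lowOrd_lt (hdom' c hc)) o]
    simp only [List.getD_eq_getElem?_getD, List.getElem?_replicate]
    rcases lt_or_ge o 128 with h | h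
    · simp only [h, if_true, Option.getD_some, Nat.zero_add]
    · simp only [Nat.not_lt.mpr h, if_false, Option.getD_none, Nat.zero_add]
  have hords : ∀ o ∈ s.toList.map lowOrd, o < 128 := by
    intro o ho
    simp only [List.mem_map] at ho
    obtain ⟨c, hc, rfl⟩ := ho
    exact lowOrd_lt (hdom' c hc)
  have hmap : s.toList.map lowA = (s.toList.map lowOrd).map Char.ofNat := by
    rw [List.map_map]
    apply List.map_congr_left
    intro c hc
    exact lowA_eq (hdom' c hc)
  rw [hmap]
  apply PySem.List.sorted_id_eq_of_perm_of_pairwise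
  · simp only [hcnt]
    exact perm_flatten _ hords
  · exact pairwise_flatten_out _
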